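-- pv_equiv track=rewrite | github.com/chenIshi/game-distance2-coloring | src/game_coloring/graphs.py | make_path_graph
-- ===== SOURCE A (Python) =====
-- Graph = tuple[frozenset[int], ...]
--
-- def normalize_graph(adjacency: list[set[int]]) -> Graph:
--     return tuple(frozenset(neighbors) for neighbors in adjacency)
--
-- def make_path_graph(n: int) -> Graph:
--     if n < 0:
--         raise ValueError("n must be non-negative")
--
--     adjacency = [set() for _ in range(n)]
--     for vertex in range(n - 1):
--         adjacency[vertex].add(vertex + 1)
--         adjacency[vertex + 1].add(vertex)
--     return normalize_graph(adjacency)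
-- ===== SOURCE B (Python) =====
-- def make_path_graph(n):
--     if n < 0:
--         raise ValueError("n must be non-negative")
--     return tuple(
--         frozenset(u for u in (v - 1, v + 1) if 0 <= u < n)
--         for v in range(n)
--     )
-- ===== Notes on version B (the rewrite author's own statement) =====
-- stated objective: simpler
-- what changed: B builds the graph vertex-by-vertex, computing each vertex's neighbor set in closed form as the in-bounds elements of (v-1, v+1), instead of A's edge loop that mutates a list of shared sets twice per edge and then normalizes it.
import Mathlib
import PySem

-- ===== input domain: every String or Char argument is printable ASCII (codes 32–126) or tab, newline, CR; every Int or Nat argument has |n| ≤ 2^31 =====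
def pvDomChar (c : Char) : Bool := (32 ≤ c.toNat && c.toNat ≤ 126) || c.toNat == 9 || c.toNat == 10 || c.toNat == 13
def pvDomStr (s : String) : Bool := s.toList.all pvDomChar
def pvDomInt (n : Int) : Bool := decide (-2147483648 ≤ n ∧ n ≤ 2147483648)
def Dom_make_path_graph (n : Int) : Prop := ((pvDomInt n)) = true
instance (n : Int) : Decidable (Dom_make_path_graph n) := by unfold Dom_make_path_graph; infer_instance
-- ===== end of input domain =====

-- B builds each vertex's neighbor set in closed form (one vertex pass) instead of A's
-- edge loop mutating two shared sets per edge; same cost, simpler.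

-- ===== PORT A =====
-- normalize_graph: tuple(frozenset(neighbors) for neighbors in adjacency)
def pvNormalizeGraph (adjacency : List (PySem.Set Int)) : List (List Int) :=
  adjacency.map (fun neighbors => PySem.Set.ofList neighbors)

-- one iteration of A's edge loop: adjacency[vertex].add(vertex+1); adjacency[vertex+1].add(vertex)
def pvStepA (adj : List (PySem.Set Int)) (vertex : Int) : List (PySem.Set Int) :=
  PySem.List.pySetD
    (PySem.List.pySetD adj vertex
      (PySem.Set.add (PySem.List.pyGetD adj vertex PySem.Set.empty) (vertex + 1)))
    (vertex + 1)
    (PySem.Set.add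
      (PySem.List.pyGetD
        (PySem.List.pySetD adj vertex
          (PySem.Set.add (PySem.List.pyGetD adj vertex PySem.Set.empty) (vertex + 1)))
        (vertex + 1) PySem.Set.empty)
      vertex)

def make_path_graph (n : Int) : List (List Int) :=
  if n < 0 then []  -- Python raises ValueError here; excluded by Pre_
  else
    pvNormalizeGraph
      ((PySem.List.pyRange 0 (n - 1) 1).foldl pvStepA
        ((PySem.List.pyRange 0 n 1).map (fun _ => PySem.Set.empty)))

-- ===== PORT B =====
def make_path_graph_alt (n : Int) : List (List Int) :=
  if n < 0 then []  -- Python raises ValueError here; excluded by Pre_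
  else
    (PySem.List.pyRange 0 n 1).map (fun v =>
      PySem.Set.ofList ([v - 1, v + 1].filter (fun u => decide (0 ≤ u) && decide (u < n))))

-- ===== PRECONDITION & SPEC =====
def Pre_make_path_graph (n : Int) : Prop := 0 ≤ n
instance (n : Int) : Decidable (Pre_make_path_graph n) := by unfold Pre_make_path_graph; infer_instance
def pvWitness_make_path_graph : Int := (3)

def Spec_make_path_graph (n : Int) (out : List (List Int)) : Prop := out = make_path_graph_alt n
instance (n : Int) (out : List (List Int)) : Decidable (Spec_make_path_graph n out) := by unfold Spec_make_path_graph; infer_instance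

-- ===== CLAIM (what is proved, stated in full; the proofs are below) =====
def Claim_equal_make_path_graph : Prop := ∀ (n : Int), Dom_make_path_graph n → Pre_make_path_graph n → Spec_make_path_graph n (make_path_graph n)

-- ===== LEMMAS AND PROOFS =====

-- the loop invariant: state after processing edges 0..k-1
def pvS (n k : Int) : List (List Int) :=
  (PySem.List.pyRange 0 n 1).map (fun v =>
    (if 0 ≤ v - 1 ∧ v ≤ k then [v - 1] else []) ++ (if v < k then [v + 1] else []))

lemma pvS_zero (n : Int) : pvS n 0 = (PySem.List.pyRange 0 n 1).map (fun _ => PySem.Set.empty (α := Int)) := by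
  unfold pvS
  apply List.map_congr_left
  intro v hv
  rw [PySem.List.mem_pyRange_one] at hv
  have h1 : ¬ (0 ≤ v - 1 ∧ v ≤ 0) := by omega
  have h2 : ¬ (v < 0) := by omega
  simp only [h1, h2, if_false, List.append_nil]
  simp [PySem.Set.empty]

lemma pvS_getElem? (n k : Int) (i : Nat) :
    (pvS n k)[i]? = if i < n.toNat then
      some ((if 0 ≤ (i:Int) - 1 ∧ (i:Int) ≤ k then [(i:Int) - 1] else []) ++ (if (i:Int) < k then [(i:Int) + 1] else []))
    else none := by
  unfold pvS
  rw [List.getElem?_map, PySem.List.getElem?_pyRange_one]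
  by_cases h : i < n.toNat
  · rw [if_pos (by omega), if_pos h]
    simp
  · rw [if_neg (by omega), if_neg h]
    rfl

lemma pvS_length (n k : Int) : (pvS n k).length = n.toNat := by
  unfold pvS
  simp [PySem.List.length_pyRange_one]

lemma pvS_getD (n k v : Int) (h0 : 0 ≤ v) (h1 : v < n) :
    PySem.List.pyGetD (pvS n k) v PySem.Set.empty
      = (if 0 ≤ v - 1 ∧ v ≤ k then [v - 1] else []) ++ (if v < k then [v + 1] else []) := by
  rw [PySem.List.pyGetD_of_nonneg _ _ h0, List.getD_eq_getElem?_getD, pvS_getElem? n k v.toNat]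
  have hc : ((v.toNat : Nat) : Int) = v := by omega
  simp only [hc]
  rw [if_pos (by omega)]
  rfl

lemma pv_step (n k : Int) (hk : 0 ≤ k) (hkn : k ≤ n - 2) :
    pvStepA (pvS n k) k = pvS n (k + 1) := by
  have hlen : (pvS n k).length = n.toNat := pvS_length n k
  have hk1 : k.toNat < n.toNat := by omega
  have hk2 : (k + 1).toNat < n.toNat := by omega
  -- the value written at index k
  have hA : PySem.Set.add (PySem.List.pyGetD (pvS n k) k PySem.Set.empty) (k + 1)
      = (if 0 ≤ k - 1 ∧ k ≤ k + 1 then [k - 1] else []) ++ (if k < k + 1 then [k + 1] else []) := by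
    rw [pvS_getD n k k hk (by omega)]
    rw [if_neg (show ¬ (k < k) from by omega), if_pos (show k < k + 1 from by omega)]
    by_cases h : 0 ≤ k - 1
    · rw [if_pos (show 0 ≤ k - 1 ∧ k ≤ k from ⟨h, le_refl k⟩),
          if_pos (show 0 ≤ k - 1 ∧ k ≤ k + 1 from ⟨h, by omega⟩)]
      simp only [PySem.Set.add, PySem.Set.contains]
      simp
      omega
    · rw [if_neg (show ¬ (0 ≤ k - 1 ∧ k ≤ k) from fun hh => h hh.1),
          if_neg (show ¬ (0 ≤ k - 1 ∧ k ≤ k + 1) from fun hh => h hh.1)]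
      simp [PySem.Set.add, PySem.Set.contains]
  unfold pvStepA
  rw [PySem.List.pySetD_of_nonneg (i := k) _ _ hk]
  -- the set at index k+1 is still empty before its update
  have hB : PySem.List.pyGetD (List.set (pvS n k) k.toNat
        (PySem.Set.add (PySem.List.pyGetD (pvS n k) k PySem.Set.empty) (k + 1))) (k + 1) PySem.Set.empty
      = [] := by
    rw [PySem.List.pyGetD_of_nonneg _ _ (by omega : (0:Int) ≤ k + 1), List.getD_eq_getElem?_getD]
    rw [List.getElem?_set, if_neg (show ¬ (k.toNat = (k + 1).toNat) from by omega),
        pvS_getElem? n k (k + 1).toNat]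
    have hc : (((k + 1).toNat : Nat) : Int) = k + 1 := by omega
    simp only [hc]
    rw [if_pos hk2, if_neg (show ¬ (0 ≤ k + 1 - 1 ∧ k + 1 ≤ k) from by omega),
        if_neg (show ¬ (k + 1 < k) from by omega)]
    rfl
  rw [PySem.List.pySetD_of_nonneg (i := k + 1) _ _ (by omega)]
  rw [hB, hA]
  apply List.ext_getElem?
  intro i
  rw [List.getElem?_set, List.getElem?_set, pvS_getElem? n (k + 1) i]
  by_cases hik1 : (k + 1).toNat = i
  · rw [if_pos hik1, List.length_set, hlen, if_pos hk2,
        if_pos (show i < n.toNat from by omega),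
        if_pos (show 0 ≤ (i:Int) - 1 ∧ (i:Int) ≤ k + 1 from by omega),
        if_neg (show ¬ ((i:Int) < k + 1) from by omega),
        show (i:Int) - 1 = k from by omega]
    simp [PySem.Set.add, PySem.Set.contains]
  · rw [if_neg hik1]
    by_cases hik : k.toNat = i
    · rw [if_pos hik, hlen, if_pos hk1, if_pos (show i < n.toNat from by omega)]
      simp only [show ((i:Int)) = k from by omega]
    · rw [if_neg hik, pvS_getElem? n k i]
      by_cases hi : i < n.toNat
      · rw [if_pos hi, if_pos hi]
        by_cases hA' : 0 ≤ (i:Int) - 1 ∧ (i:Int) ≤ k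
        · rw [if_pos hA', if_pos (show 0 ≤ (i:Int) - 1 ∧ (i:Int) ≤ k + 1 from by omega)]
          by_cases hB' : (i:Int) < k
          · rw [if_pos hB', if_pos (show (i:Int) < k + 1 from by omega)]
          · rw [if_neg hB', if_neg (show ¬ ((i:Int) < k + 1) from by omega)]
        · rw [if_neg hA', if_neg (show ¬ (0 ≤ (i:Int) - 1 ∧ (i:Int) ≤ k + 1) from by
            intro h
            exact hA' ⟨h.1, by omega⟩)]
          by_cases hB' : (i:Int) < k
          · rw [if_pos hB', if_pos (show (i:Int) < k + 1 from by omega)]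
          · rw [if_neg hB', if_neg (show ¬ ((i:Int) < k + 1) from by omega)]
      · rw [if_neg hi, if_neg hi]

lemma pv_loop (n : Int) (j : Nat) (hj : (j : Int) ≤ n - 1) :
    (PySem.List.pyRange 0 j 1).foldl pvStepA (pvS n 0) = pvS n j := by
  induction j with
  | zero => simp [PySem.List.pyRange_one_eq_nil]
  | succ m ih =>
    have hm : (m : Int) ≤ n - 1 := by push_cast at hj ⊢; omega
    have hsplit : PySem.List.pyRange 0 ((m : Int) + 1) 1 = PySem.List.pyRange 0 m 1 ++ [(m : Int)] := by
      exact PySem.List.pyRange_one_succ_right (by omega)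
    have : ((m + 1 : Nat) : Int) = (m : Int) + 1 := by push_cast; ring
    rw [this, hsplit, List.foldl_append, ih hm]
    simp only [List.foldl_cons, List.foldl_nil]
    rw [pv_step n m (by omega) (by push_cast at hj; omega)]

-- ===== VERDICT (by name: the statement is the Claim_ definition above) =====
theorem make_path_graph_spec : Claim_equal_make_path_graph := by
  intro n _ hpre
  have hn : 0 ≤ n := hpre
  show make_path_graph n = make_path_graph_alt n
  unfold make_path_graph make_path_graph_alt
  rw [if_neg (by omega), if_neg (by omega), ← pvS_zero]
  have hfold : (PySem.List.pyRange 0 (n - 1) 1).foldl pvStepA (pvS n 0) = pvS n (n - 1) := by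
    by_cases h0 : n = 0
    · subst h0
      rw [PySem.List.pyRange_one_eq_nil (by omega)]
      simp only [List.foldl_nil]
      unfold pvS
      rw [PySem.List.pyRange_one_eq_nil (by omega)]
      rfl
    · have hcast : ((n - 1).toNat : Int) = n - 1 := by omega
      rw [← hcast]
      exact pv_loop n (n - 1).toNat (by omega)
  rw [hfold]
  unfold pvNormalizeGraph pvS
  rw [List.map_map]
  apply List.map_congr_left
  intro v hv
  rw [PySem.List.mem_pyRange_one] at hv
  simp only [Function.comp]
  congr 1
  have hfun : (fun u : Int => decide (0 ≤ u) && decide (u < n)) = (fun u : Int => decide (0 ≤ u ∧ u < n)) := by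
    funext u
    by_cases h : 0 ≤ u <;> by_cases h' : u < n <;> simp [h, h']
  rw [hfun]
  by_cases h1 : 0 ≤ v - 1 <;> by_cases h2 : v < n - 1
  · rw [if_pos (show 0 ≤ v - 1 ∧ v ≤ n - 1 from by omega), if_pos h2]
    simp [List.filter_cons, show 0 ≤ v - 1 ∧ v - 1 < n from by omega,
      show 0 ≤ v + 1 ∧ v + 1 < n from by omega]
    omega
  · rw [if_pos (show 0 ≤ v - 1 ∧ v ≤ n - 1 from by omega), if_neg h2]
    simp [List.filter_cons, show 0 ≤ v - 1 ∧ v - 1 < n from by omega,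
      show ¬ (0 ≤ v + 1 ∧ v + 1 < n) from by omega]
    omega
  · rw [if_neg (show ¬ (0 ≤ v - 1 ∧ v ≤ n - 1) from by omega), if_pos h2]
    simp [List.filter_cons, show 0 ≤ v + 1 ∧ v + 1 < n from by omega]
    omega
  · rw [if_neg (show ¬ (0 ≤ v - 1 ∧ v ≤ n - 1) from by omega), if_neg h2]
    simp [List.filter_cons, show ¬ (0 ≤ v + 1 ∧ v + 1 < n) from by omega]
    omega
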